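-- pv_equiv track=rewrite | github.com/Snazzilicious/SimpleMOM | MeshUtils.py | get_edge_nbr_map
-- ===== SOURCE A (Python) =====
-- def get_edge_nbr_map( n_faces, edges ):
-- 	"""Produces a map from each face to faces with which it shares and edge.
--
-- 	Arguments
-- 		n_faces : integer
-- 			The number of faces in the mesh.
-- 		edges : output of get_edges
-- 			Map from edge to faces including it.
--
-- 	Returns
-- 		nbr_map : list of lists
-- 			nbr_map[i] is a list of indices of faces that share edges with face i.
-- 	"""
-- 	nbr_map = [[] for _ in range(n_faces)]
--
-- 	for e in edges:
-- 		if len(edges[e]) > 1: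
-- 			i = edges[e][0]
-- 			j = edges[e][1]
--
-- 			nbr_map[i].append( j )
-- 			nbr_map[j].append( i )
--
-- 	for i in nbr_map:
-- 		i.sort()
--
-- 	return nbr_map
-- ===== SOURCE B (Python) =====
-- def get_edge_nbr_map(n_faces, edges):
--     """Gather formulation: build each face's neighbor row directly by scanning
--     the qualifying edge values, instead of scattering appends into buckets."""
--     incident = [f for f in edges.values() if len(f) > 1]
--     return [sorted(nb for f in incident
--                       for sel, nb in ((f[0], f[1]), (f[1], f[0]))
--                       if sel == i)
--             for i in range(n_faces)]
-- ===== Notes on version B (the rewrite author's own statement) =====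
-- stated objective: alternative
-- what changed: A scatters appends into mutable per-face buckets while iterating edges and then sorts each bucket; B inverts the decomposition: it gathers each face's row directly by one comprehension over the qualifying edge values per face (no mutable bucket array, no scatter), sorting each gathered row.
-- outside the precondition, e.g. on get_edge_nbr_map(2, {(0, 1): [1, -1]}): A returns [[], [-1, 1]], B returns [[], [-1]]; on get_edge_nbr_map(1, {(0, 0): [5, 5]}): A raises IndexError, B returns [[]]
import Mathlib
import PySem

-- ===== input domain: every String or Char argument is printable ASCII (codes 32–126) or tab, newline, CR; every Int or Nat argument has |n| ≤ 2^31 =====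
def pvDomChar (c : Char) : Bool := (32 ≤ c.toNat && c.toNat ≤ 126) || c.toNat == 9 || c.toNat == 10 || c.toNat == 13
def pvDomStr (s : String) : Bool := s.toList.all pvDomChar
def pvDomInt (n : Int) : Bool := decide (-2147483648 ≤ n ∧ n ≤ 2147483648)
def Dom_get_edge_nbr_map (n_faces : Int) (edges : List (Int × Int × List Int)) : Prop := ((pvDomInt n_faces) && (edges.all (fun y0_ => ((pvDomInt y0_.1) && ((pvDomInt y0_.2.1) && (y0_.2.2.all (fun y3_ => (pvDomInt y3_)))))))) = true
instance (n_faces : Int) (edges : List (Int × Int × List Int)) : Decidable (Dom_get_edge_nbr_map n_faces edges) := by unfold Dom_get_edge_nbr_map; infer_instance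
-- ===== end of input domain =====

-- B replaces A's scatter-into-mutable-buckets-then-sort with a per-face gather comprehension (same values; no speed claim).
-- The Python `edges` argument is a dict keyed by (Int, Int); both ports first rebuild that dict from the
-- association list exactly as Python's dict(...) does (insertion order, last value per key wins).
def pvEdgeDict (edges : List (Int × Int × List Int)) : PySem.Dict (Int × Int) (List Int) :=
  edges.foldl (fun d e => PySem.Dict.insert d (e.1, e.2.1) e.2.2) PySem.Dict.empty

-- ===== PORT A =====
-- loop body of `for e in edges: if len(edges[e]) > 1: …` (it uses only the entry's value)
def pvStepA (m : List (List Int)) (fs : List Int) : List (List Int) :=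
  if 1 < fs.length then
    let i := PySem.List.pyGetD fs 0 0
    let j := PySem.List.pyGetD fs 1 0
    let m1 := PySem.List.pySetD m i (PySem.List.pyGetD m i [] ++ [j])
    PySem.List.pySetD m1 j (PySem.List.pyGetD m1 j [] ++ [i])
  else m
def get_edge_nbr_map (n_faces : Int) (edges : List (Int × Int × List Int)) : List (List Int) :=
  let nbr0 : List (List Int) := (List.range n_faces.toNat).map (fun _ => ([] : List Int))
  let nbr := (pvEdgeDict edges).items.foldl (fun m e => pvStepA m e.2) nbr0
  nbr.map (fun b => PySem.List.sorted b (fun x => x) false)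

-- ===== PORT B =====
def get_edge_nbr_map_alt (n_faces : Int) (edges : List (Int × Int × List Int)) : List (List Int) :=
  let incident := ((pvEdgeDict edges).values).filter (fun f => 1 < f.length)
  (PySem.List.pyRange 0 n_faces 1).map (fun i =>
    PySem.List.sorted
      (incident.flatMap (fun f =>
        ([(PySem.List.pyGetD f 0 0, PySem.List.pyGetD f 1 0),
          (PySem.List.pyGetD f 1 0, PySem.List.pyGetD f 0 0)].filter (fun p => p.1 == i)).map Prod.snd))
      (fun x => x) false)

-- ===== PRECONDITION & SPEC =====
-- Pre_ excludes edges (including entries shadowed by a duplicate key) whose first two incident faces are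
-- not in [0, n_faces): a value outside [-n_faces, n_faces) makes A raise IndexError, and a negative value
-- silently wraps to a bucket counted from the end — an artefact of Python's negative list indexing on
-- which neither program's output is an intended adjacency.
def Pre_get_edge_nbr_map (n_faces : Int) (edges : List (Int × Int × List Int)) : Prop :=
  ∀ e ∈ edges, 1 < e.2.2.length →
    0 ≤ e.2.2.getD 0 0 ∧ e.2.2.getD 0 0 < n_faces ∧ 0 ≤ e.2.2.getD 1 0 ∧ e.2.2.getD 1 0 < n_faces
instance (n_faces : Int) (edges : List (Int × Int × List Int)) : Decidable (Pre_get_edge_nbr_map n_faces edges) := by unfold Pre_get_edge_nbr_map; infer_instance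

def pvWitness_get_edge_nbr_map : Int × (List (Int × Int × List Int)) :=
  (3, [(0, 1, [0, 1]), (1, 2, [2, 0]), (5, 5, [1])])

def Spec_get_edge_nbr_map (n_faces : Int) (edges : List (Int × Int × List Int)) (out : List (List Int)) : Prop := out = get_edge_nbr_map_alt n_faces edges
instance (n_faces : Int) (edges : List (Int × Int × List Int)) (out : List (List Int)) : Decidable (Spec_get_edge_nbr_map n_faces edges out) := by unfold Spec_get_edge_nbr_map; infer_instance

-- ===== CLAIM (what is proved, stated in full; the proofs are below) =====
def Claim_equal_get_edge_nbr_map : Prop := ∀ (n_faces : Int) (edges : List (Int × Int × List Int)), Dom_get_edge_nbr_map n_faces edges → Pre_get_edge_nbr_map n_faces edges → Spec_get_edge_nbr_map n_faces edges (get_edge_nbr_map n_faces edges)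

-- ===== LEMMAS AND PROOFS =====

-- the contribution of one qualifying edge value to face k's row, in A's append order
def pvContrib (k : Int) (fs : List Int) : List Int :=
  (if PySem.List.pyGetD fs 0 0 = k then [PySem.List.pyGetD fs 1 0] else []) ++
  (if PySem.List.pyGetD fs 1 0 = k then [PySem.List.pyGetD fs 0 0] else [])

lemma pvStep_length (m : List (List Int)) (fs : List Int) : (pvStepA m fs).length = m.length := by
  unfold pvStepA; split <;> simp [PySem.List.length_pySetD]

lemma pvFold_length (vs : List (List Int)) (m : List (List Int)) :
    (vs.foldl pvStepA m).length = m.length := by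
  induction vs generalizing m with
  | nil => rfl
  | cons fs t ih => rw [List.foldl_cons, ih, pvStep_length]

-- loop invariant of A's scatter fold: bucket k ends up holding its initial content followed by
-- the in-order contributions of the qualifying edge values
lemma pvFold_getElem (vs : List (List Int)) (m : List (List Int))
    (hv : ∀ fs ∈ vs, 1 < fs.length →
      0 ≤ PySem.List.pyGetD fs 0 0 ∧ PySem.List.pyGetD fs 0 0 < (m.length : Int) ∧
      0 ≤ PySem.List.pyGetD fs 1 0 ∧ PySem.List.pyGetD fs 1 0 < (m.length : Int))
    (k : Nat) (hk : k < m.length) :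
    (vs.foldl pvStepA m)[k]? =
      some (m[k] ++ vs.flatMap (fun fs => if 1 < fs.length then pvContrib (k : Int) fs else [])) := by
  induction vs generalizing m with
  | nil => simp [List.getElem?_eq_getElem hk]
  | cons fs t ih =>
    by_cases hlen : 1 < fs.length
    · obtain ⟨h0i, h1i, h0j, h1j⟩ := hv fs (by simp) hlen
      set i := PySem.List.pyGetD fs 0 0 with hi
      set j := PySem.List.pyGetD fs 1 0 with hj
      have hstep : pvStepA m fs =
          (m.set i.toNat (m[i.toNat]'(by omega) ++ [j])).set j.toNat
            (((m.set i.toNat (m[i.toNat]'(by omega) ++ [j]))[j.toNat]'(by simp; omega)) ++ [i]) := by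
        unfold pvStepA
        simp only [if_pos hlen]
        rw [PySem.List.pyGetD_eq_getElem m [] h0i h1i,
            PySem.List.pySetD_of_nonneg m _ h0i,
            PySem.List.pyGetD_eq_getElem _ [] h0j (by simpa using h1j),
            PySem.List.pySetD_of_nonneg _ _ h0j]
      rw [List.foldl_cons, hstep]
      set m2 := (m.set i.toNat (m[i.toNat]'(by omega) ++ [j])).set j.toNat
            (((m.set i.toNat (m[i.toNat]'(by omega) ++ [j]))[j.toNat]'(by simp; omega)) ++ [i]) with hm2
      have hlen2 : m2.length = m.length := by simp [hm2]
      rw [ih m2 (by rw [hlen2]; exact fun fs h => hv fs (by simp [h])) (by omega)]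
      have hcontrib : m2[k]'(by omega) = m[k] ++ pvContrib (k : Int) fs := by
        have hik : (i = (k:Int)) ↔ i.toNat = k := by omega
        have hjk : (j = (k:Int)) ↔ j.toNat = k := by omega
        by_cases hik' : i.toNat = k <;> by_cases hjk' : j.toNat = k
        · have e1 : i = (k:Int) := hik.mpr hik'
          have e2 : j = (k:Int) := hjk.mpr hjk'
          simp [hm2, pvContrib, ← hi, ← hj, e1, e2]
        · have e1 : i = (k:Int) := hik.mpr hik'
          have e2 : ¬ (j = (k:Int)) := fun h => hjk' (hjk.mp h)
          simp [hm2, pvContrib, ← hi, ← hj, List.getElem_set, hjk', e1, e2]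
        · have e1 : ¬ (i = (k:Int)) := fun h => hik' (hik.mp h)
          have e2 : j = (k:Int) := hjk.mpr hjk'
          simp [hm2, pvContrib, ← hi, ← hj, hik', e1, e2]
        · have e1 : ¬ (i = (k:Int)) := fun h => hik' (hik.mp h)
          have e2 : ¬ (j = (k:Int)) := fun h => hjk' (hjk.mp h)
          simp [hm2, pvContrib, ← hi, ← hj, List.getElem_set, hik', hjk', e1, e2]
      simp only [List.flatMap_cons, if_pos hlen, hcontrib, List.append_assoc]
    · rw [List.foldl_cons]
      have : pvStepA m fs = m := by unfold pvStepA; rw [if_neg hlen]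
      rw [this, ih m (fun fs h => hv fs (by simp [h])) hk]
      simp [hlen]

lemma pvValues_mem (edges : List (Int × Int × List Int)) :
    ∀ v ∈ (pvEdgeDict edges).values, ∃ e ∈ edges, v = e.2.2 := by
  suffices h : ∀ (d : PySem.Dict (Int × Int) (List Int)),
      ∀ v ∈ (edges.foldl (fun d e => PySem.Dict.insert d (e.1, e.2.1) e.2.2) d).values,
        v ∈ d.values ∨ ∃ e ∈ edges, v = e.2.2 by
    intro v hv
    rcases h PySem.Dict.empty v hv with h' | h'
    · simp [PySem.Dict.empty] at h'
    · exact h'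
  induction edges with
  | nil => intro d v hv; exact Or.inl hv
  | cons e t ih =>
    intro d v hv
    rcases ih (d.insert (e.1, e.2.1) e.2.2) v hv with h' | h'
    · rcases PySem.Dict.mem_values_insert d _ _ _ h' with h'' | h''
      · exact Or.inr ⟨e, by simp, h''⟩
      · exact Or.inl h''
    · obtain ⟨e', he', hve⟩ := h'
      exact Or.inr ⟨e', by simp [he'], hve⟩

lemma pvPairFilter (a b i : Int) :
  (([(a,b),(b,a)] : List (Int × Int)).filter (fun p => p.1 == i)).map Prod.snd
    = (if a = i then [b] else []) ++ (if b = i then [a] else []) := by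
  simp [List.filter]; split <;> split <;> simp_all

lemma pvFlatMapFilter (vs : List (List Int)) (p : List Int → Bool) (g : List Int → List Int) :
  (vs.filter p).flatMap g = vs.flatMap (fun f => if p f then g f else []) := by
  induction vs with
  | nil => rfl
  | cons a t ih => by_cases h : p a <;> simp [h, ih]

lemma pvGetD0 (fs : List Int) : PySem.List.pyGetD fs 0 0 = fs.getD 0 0 := by
  have := PySem.List.pyGetD_natCast fs 0 0; exact_mod_cast this
lemma pvGetD1 (fs : List Int) : PySem.List.pyGetD fs 1 0 = fs.getD 1 0 := by
  have := PySem.List.pyGetD_natCast fs 1 0; exact_mod_cast this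
theorem pv_main (n_faces : Int) (edges : List (Int × Int × List Int))
    (hpre : Pre_get_edge_nbr_map n_faces edges) :
    get_edge_nbr_map n_faces edges = get_edge_nbr_map_alt n_faces edges := by
  simp only [get_edge_nbr_map, get_edge_nbr_map_alt]
  set vs : List (List Int) := (pvEdgeDict edges).items.map Prod.snd with hvs
  have hvalues : (pvEdgeDict edges).values = vs := rfl
  set n : Nat := n_faces.toNat with hn
  set m0 : List (List Int) := (List.range n).map (fun _ => ([] : List Int)) with hm0
  have hm0len : m0.length = n := by simp [hm0]
  have hfold : (pvEdgeDict edges).items.foldl (fun m e => pvStepA m e.2) m0 = vs.foldl pvStepA m0 := by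
    rw [hvs, List.foldl_map]
  have hv : ∀ fs ∈ vs, 1 < fs.length →
      0 ≤ PySem.List.pyGetD fs 0 0 ∧ PySem.List.pyGetD fs 0 0 < (m0.length : Int) ∧
      0 ≤ PySem.List.pyGetD fs 1 0 ∧ PySem.List.pyGetD fs 1 0 < (m0.length : Int) := by
    intro fs hfs hlen
    obtain ⟨e, he, hfe⟩ := pvValues_mem edges fs (hvalues ▸ hfs)
    obtain ⟨a1, a2, a3, a4⟩ := hpre e he (hfe ▸ hlen)
    rw [hm0len, pvGetD0, pvGetD1, hfe]
    refine ⟨a1, by omega, a3, by omega⟩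
  -- rewrite the range of B
  have hrange : PySem.List.pyRange 0 n_faces 1 = (List.range n).map (fun k : Nat => (k : Int)) := by
    by_cases h : 0 ≤ n_faces
    · rw [show n_faces = ((n : Nat) : Int) by omega]
      exact PySem.List.pyRange_zero_natCast n
    · rw [show n = 0 by omega]
      simp [PySem.List.pyRange]
      omega
  rw [hfold, hrange, List.map_map]
  apply List.ext_getElem?
  intro k
  rcases lt_or_ge k n with hk | hk
  · have hkm : k < m0.length := by omega
    rw [List.getElem?_map, pvFold_getElem vs m0 hv k hkm]
    rw [List.getElem?_map, List.getElem?_range hk]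
    simp only [Option.map_some, Function.comp_apply]
    congr 1
    have hm0k : m0[k]'hkm = [] := by simp [hm0]
    rw [hm0k, List.nil_append]
    congr 1
    rw [pvFlatMapFilter]
    apply List.flatMap_congr
    intro x hx
    by_cases hl : 1 < x.length <;> simp [hl, pvPairFilter, pvContrib]
  · rw [List.getElem?_eq_none, List.getElem?_eq_none]
    · simp; omega
    · rw [List.length_map, pvFold_length]; omega

-- ===== VERDICT (by name: the statement is the Claim_ definition above) =====
theorem get_edge_nbr_map_spec : Claim_equal_get_edge_nbr_map :=
  fun n_faces edges _ hpre => pv_main n_faces edges hpre
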